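-- pv_equiv track=rewrite | github.com/pomfy113/playground | playground8-new1.py | reflections
-- ===== SOURCE A (Python) =====
-- DIM_X = 0
--
-- DIM_Y = 0
--
-- def reflections(unit, reflects):
--     """Create reflections of coordinates."""
--     # All possible reflections of what you pass in
--     mirrored_x = [unit[0]]
--     mirrored_y = [unit[1]]
--     # The original coordinates of who we're trying to mirror
--     unit_x = unit[0]
--     unit_y = unit[1]
--     # Four temporary variables
--     pos_x = unit_x
--     neg_x = unit_x
--     pos_y = unit_y
--     neg_y = unit_y
--
--     for passes in range(1, reflects+1):
--         # Mirrors alternate; odds and evens: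
--         if passes % 2 == 1:
--             # Possible x-coordinates
--             pos_x += 2 * (DIM_X - unit_x)
--             neg_x -= 2 * unit_x
--             mirrored_x.append(pos_x)
--             mirrored_x.append(neg_x)
--             # Possible y-coordinates
--             pos_y += 2 * (DIM_Y - unit_y)
--             neg_y -= 2 * unit_y
--             mirrored_y.append(pos_y)
--             mirrored_y.append(neg_y)
--         else:
--             # Possible x-coordinates
--             pos_x += 2 * unit_x
--             neg_x -= 2 * (DIM_X - unit_x)
--             mirrored_x.append(pos_x)
--             mirrored_x.append(neg_x)
--             # Possible y-coordinates
--             pos_y += 2 * unit_y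
--             neg_y -= 2 * (DIM_Y - unit_y)
--             mirrored_y.append(pos_y)
--             mirrored_y.append(neg_y)
--
--     return (mirrored_x, mirrored_y)
-- ===== SOURCE B (Python) =====
-- DIM_X = 0
--
-- DIM_Y = 0
--
-- def _pair(pass_no, u, dim):
--     """Both new coordinates of a pass, closed-form from the pass index."""
--     if pass_no % 2 == 1:
--         m = (pass_no + 1) // 2
--         return [2 * m * dim - u, -u - 2 * (m - 1) * dim]
--     else:
--         m = pass_no // 2
--         return [2 * m * dim + u, u - 2 * m * dim]
--
-- def reflections(unit, reflects):
--     """Create reflections of coordinates (closed-form per pass, no running state)."""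
--     ux, uy = unit[0], unit[1]
--     xs = [ux] + [v for p in range(1, reflects + 1) for v in _pair(p, ux, DIM_X)]
--     ys = [uy] + [v for p in range(1, reflects + 1) for v in _pair(p, uy, DIM_Y)]
--     return (xs, ys)
-- ===== Notes on version B (the rewrite author's own statement) =====
-- stated objective: simpler
-- what changed: Replaces the four running accumulators mutated across iterations with a closed-form pair of values computed directly from each pass index (m = pass//2), assembled by a flat comprehension; no state is carried between iterations.
import Mathlib
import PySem

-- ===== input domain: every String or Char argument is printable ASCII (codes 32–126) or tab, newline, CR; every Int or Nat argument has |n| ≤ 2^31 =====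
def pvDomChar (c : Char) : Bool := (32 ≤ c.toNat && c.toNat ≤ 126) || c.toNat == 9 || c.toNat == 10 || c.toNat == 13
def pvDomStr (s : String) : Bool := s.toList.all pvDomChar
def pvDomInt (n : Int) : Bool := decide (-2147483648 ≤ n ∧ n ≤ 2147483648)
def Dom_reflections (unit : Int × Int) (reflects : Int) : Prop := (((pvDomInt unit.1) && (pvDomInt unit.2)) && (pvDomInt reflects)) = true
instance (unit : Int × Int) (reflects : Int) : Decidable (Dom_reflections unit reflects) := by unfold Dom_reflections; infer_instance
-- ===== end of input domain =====

-- B replaces the four running accumulators by a closed-form pair computed from each pass index (objective: simpler/alternative; not faster).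

-- module constants
def DIM_X : Int := 0
def DIM_Y : Int := 0

-- ===== PORT A =====
-- literal port: fold over range(1, reflects+1) carrying (pos_x, neg_x, pos_y, neg_y, mirrored_x, mirrored_y)
def reflections (unit : Int × Int) (reflects : Int) : List Int × List Int :=
  let unit_x := unit.1
  let unit_y := unit.2
  let st := (PySem.List.pyRange 1 (reflects + 1) 1).foldl
    (fun (s : Int × Int × Int × Int × List Int × List Int) passes =>
      let (pos_x, neg_x, pos_y, neg_y, mirrored_x, mirrored_y) := s
      if PySem.Int.mod passes 2 == 1 then
        let pos_x := pos_x + 2 * (DIM_X - unit_x)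
        let neg_x := neg_x - 2 * unit_x
        let mirrored_x := mirrored_x ++ [pos_x] ++ [neg_x]
        let pos_y := pos_y + 2 * (DIM_Y - unit_y)
        let neg_y := neg_y - 2 * unit_y
        let mirrored_y := mirrored_y ++ [pos_y] ++ [neg_y]
        (pos_x, neg_x, pos_y, neg_y, mirrored_x, mirrored_y)
      else
        let pos_x := pos_x + 2 * unit_x
        let neg_x := neg_x - 2 * (DIM_X - unit_x)
        let mirrored_x := mirrored_x ++ [pos_x] ++ [neg_x]
        let pos_y := pos_y + 2 * unit_y
        let neg_y := neg_y - 2 * (DIM_Y - unit_y)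
        let mirrored_y := mirrored_y ++ [pos_y] ++ [neg_y]
        (pos_x, neg_x, pos_y, neg_y, mirrored_x, mirrored_y))
    (unit_x, unit_x, unit_y, unit_y, [unit_x], [unit_y])
  (st.2.2.2.2.1, st.2.2.2.2.2)

-- ===== PORT B =====
-- both coordinates of a pass, closed-form from the pass index
def pvPair (passNo u dim : Int) : List Int :=
  if PySem.Int.mod passNo 2 == 1 then
    let m := PySem.Int.floordiv (passNo + 1) 2
    [2 * m * dim - u, -u - 2 * (m - 1) * dim]
  else
    let m := PySem.Int.floordiv passNo 2
    [2 * m * dim + u, u - 2 * m * dim]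

def reflections_alt (unit : Int × Int) (reflects : Int) : List Int × List Int :=
  let ux := unit.1
  let uy := unit.2
  ([ux] ++ (PySem.List.pyRange 1 (reflects + 1) 1).flatMap (fun p => pvPair p ux DIM_X),
   [uy] ++ (PySem.List.pyRange 1 (reflects + 1) 1).flatMap (fun p => pvPair p uy DIM_Y))

-- ===== PRECONDITION & SPEC =====
def Spec_reflections (unit : Int × Int) (reflects : Int) (out : List Int × List Int) : Prop := out = reflections_alt unit reflects
instance (unit : Int × Int) (reflects : Int) (out : List Int × List Int) : Decidable (Spec_reflections unit reflects out) := by unfold Spec_reflections; infer_instance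

-- ===== CLAIM (what is proved, stated in full; the proofs are below) =====
def Claim_equal_reflections : Prop := ∀ (unit : Int × Int) (reflects : Int), Dom_reflections unit reflects → Spec_reflections unit reflects (reflections unit reflects)

-- ===== LEMMAS AND PROOFS =====

-- sign of the running accumulators after k passes (DIM_X = DIM_Y = 0, so pos = neg = ±unit)
def pvSign (k : Nat) : Int := if k % 2 = 0 then 1 else -1

-- the fold body of port A, named so the invariant can talk about it
def pvStepA (ux uy : Int) (s : Int × Int × Int × Int × List Int × List Int) (passes : Int) :
    Int × Int × Int × Int × List Int × List Int :=
  let (pos_x, neg_x, pos_y, neg_y, mirrored_x, mirrored_y) := s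
  if PySem.Int.mod passes 2 == 1 then
    (pos_x + 2 * (DIM_X - ux), neg_x - 2 * ux, pos_y + 2 * (DIM_Y - uy), neg_y - 2 * uy,
     mirrored_x ++ [pos_x + 2 * (DIM_X - ux)] ++ [neg_x - 2 * ux],
     mirrored_y ++ [pos_y + 2 * (DIM_Y - uy)] ++ [neg_y - 2 * uy])
  else
    (pos_x + 2 * ux, neg_x - 2 * (DIM_X - ux), pos_y + 2 * uy, neg_y - 2 * (DIM_Y - uy),
     mirrored_x ++ [pos_x + 2 * ux] ++ [neg_x - 2 * (DIM_X - ux)],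
     mirrored_y ++ [pos_y + 2 * uy] ++ [neg_y - 2 * (DIM_Y - uy)])

theorem pvFold_eq_stepA (ux uy : Int) (l : List Int) (s : Int × Int × Int × Int × List Int × List Int) :
    l.foldl
      (fun (s : Int × Int × Int × Int × List Int × List Int) passes =>
        let (pos_x, neg_x, pos_y, neg_y, mirrored_x, mirrored_y) := s
        if PySem.Int.mod passes 2 == 1 then
          let pos_x := pos_x + 2 * (DIM_X - ux)
          let neg_x := neg_x - 2 * ux
          let mirrored_x := mirrored_x ++ [pos_x] ++ [neg_x]
          let pos_y := pos_y + 2 * (DIM_Y - uy)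
          let neg_y := neg_y - 2 * uy
          let mirrored_y := mirrored_y ++ [pos_y] ++ [neg_y]
          (pos_x, neg_x, pos_y, neg_y, mirrored_x, mirrored_y)
        else
          let pos_x := pos_x + 2 * ux
          let neg_x := neg_x - 2 * (DIM_X - ux)
          let mirrored_x := mirrored_x ++ [pos_x] ++ [neg_x]
          let pos_y := pos_y + 2 * uy
          let neg_y := neg_y - 2 * (DIM_Y - uy)
          let mirrored_y := mirrored_y ++ [pos_y] ++ [neg_y]
          (pos_x, neg_x, pos_y, neg_y, mirrored_x, mirrored_y))
      s = l.foldl (pvStepA ux uy) s := by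
  induction l generalizing s with
  | nil => rfl
  | cons p t ih =>
    simp only [List.foldl_cons]
    rw [ih]
    rfl

-- value of pvPair at odd / even pass index (m contributes nothing since DIM = 0)
theorem pvPair_odd (p u dim : Int) (h : PySem.Int.mod p 2 = 1) (hd : dim = 0) :
    pvPair p u dim = [-u, -u] := by
  subst hd
  unfold pvPair
  rw [if_pos (by simp only [beq_iff_eq]; exact h)]
  simp

theorem pvPair_even (p u dim : Int) (h : PySem.Int.mod p 2 ≠ 1) (hd : dim = 0) :
    pvPair p u dim = [u, u] := by
  subst hd
  unfold pvPair
  rw [if_neg (by simp only [beq_iff_eq]; exact h)]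
  simp

theorem pvMod_cast (k : Nat) : PySem.Int.mod ((1 : Int) + k) 2 = ((1 + k) % 2 : Nat) := by
  rw [PySem.Int.mod_eq_emod_of_pos (a := 1 + (k : Int)) (b := 2) (by omega)]
  omega

-- the invariant: after the k passes 1..k, the state of A's fold is determined by pvSign and B's flatMap
theorem pvInvariant (ux uy : Int) (k : Nat) :
    (PySem.List.pyRange 1 (1 + (k : Int)) 1).foldl (pvStepA ux uy)
      (ux, ux, uy, uy, [ux], [uy]) =
    (pvSign k * ux, pvSign k * ux, pvSign k * uy, pvSign k * uy,
     [ux] ++ (PySem.List.pyRange 1 (1 + (k : Int)) 1).flatMap (fun p => pvPair p ux DIM_X),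
     [uy] ++ (PySem.List.pyRange 1 (1 + (k : Int)) 1).flatMap (fun p => pvPair p uy DIM_Y)) := by
  induction k with
  | zero =>
    simp [PySem.List.pyRange_one_eq_nil, pvSign]
  | succ n ih =>
    have hsplit : PySem.List.pyRange 1 (1 + ((n : Int) + 1)) 1
        = PySem.List.pyRange 1 (1 + (n : Int)) 1 ++ [1 + (n : Int)] := by
      have := PySem.List.pyRange_one_succ_right (a := 1) (b := 1 + (n : Int)) (by omega)
      rw [← this]
      congr 1
    push_cast
    rw [hsplit, List.foldl_append, ih]
    simp only [List.foldl_cons, List.foldl_nil, List.flatMap_append, List.flatMap_cons,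
      List.flatMap_nil, List.append_nil]
    by_cases hpar : (1 + n) % 2 = 1
    · -- pass 1+n is odd, so n is even: sign flips 1 → -1
      have hmod : PySem.Int.mod ((1 : Int) + (n : Int)) 2 = 1 := by
        rw [pvMod_cast n]; omega
      have hn : n % 2 = 0 := by omega
      have hs : pvSign n = 1 := by simp [pvSign, hn]
      have hs' : pvSign (n + 1) = -1 := by simp [pvSign]; omega
      rw [pvPair_odd _ ux DIM_X hmod rfl, pvPair_odd _ uy DIM_Y hmod rfl]
      unfold pvStepA
      dsimp only
      rw [if_pos (by simp only [beq_iff_eq]; exact hmod)]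
      simp only [DIM_X, DIM_Y, hs, hs', Prod.mk.injEq]
      refine ⟨by ring, by ring, by ring, by ring, ?_, ?_⟩ <;>
        · simp [List.append_assoc]
          try constructor
          all_goals ring
    · -- pass 1+n is even, so n is odd: sign flips -1 → 1
      have hmod : PySem.Int.mod ((1 : Int) + (n : Int)) 2 ≠ 1 := by
        rw [pvMod_cast n]
        omega
      have hn : n % 2 = 1 := by omega
      have hs : pvSign n = -1 := by simp [pvSign, hn]
      have hs' : pvSign (n + 1) = 1 := by simp [pvSign]; omega
      rw [pvPair_even _ ux DIM_X hmod rfl, pvPair_even _ uy DIM_Y hmod rfl]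
      unfold pvStepA
      dsimp only
      rw [if_neg (by simp only [beq_iff_eq]; exact hmod)]
      simp only [DIM_X, DIM_Y, hs, hs', Prod.mk.injEq]
      refine ⟨by ring, by ring, by ring, by ring, ?_, ?_⟩ <;>
        · simp [List.append_assoc]
          try constructor
          all_goals ring

-- ===== VERDICT (by name: the statement is the Claim_ definition above) =====
theorem reflections_spec : Claim_equal_reflections := by
  intro unit reflects _
  unfold Spec_reflections reflections reflections_alt
  simp only []
  rw [pvFold_eq_stepA]
  by_cases hr : 0 ≤ reflects
  · obtain ⟨k, hk⟩ : ∃ k : Nat, reflects = (k : Int) := ⟨reflects.toNat, by omega⟩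
    subst hk
    have h1 : (k : Int) + 1 = 1 + (k : Int) := by omega
    rw [h1, pvInvariant]
  · have hnil : PySem.List.pyRange 1 (reflects + 1) 1 = [] :=
      PySem.List.pyRange_one_eq_nil (by omega)
    simp [hnil]
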